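-- pv_equiv track=rewrite | github.com/ktej0713-cmd/jjang | output/seo/run_batch18.py | clamp
-- ===== SOURCE A (Python) =====
-- def clamp(s, n, sep):
--     if len(s) <= n: return s
--     r = ""
--     for p in s.split(sep):
--         c = (r + sep + p) if r else p
--         if len(c) <= n: r = c
--         else: break
--     return r
-- ===== SOURCE B (Python) =====
-- # B: split once, do length arithmetic to count how many fields fit, emit with one final join
-- # (A instead grows the result string and re-measures it on every step).
-- def clamp(s, n, sep):
--     if len(s) <= n:
--         return s
--     parts = _drop_leading_empty(s.split(sep))
--     if not parts or len(parts[0]) > n: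
--         return ''
--     k = 1 + _count_fit(parts[1:], n, sep, len(parts[0]))
--     return sep.join(parts[:k])
--
-- def _drop_leading_empty(parts):
--     # an empty field joined onto an empty result contributes nothing (no separator either)
--     i = 0
--     while i < len(parts) and parts[i] == '':
--         i += 1
--     return parts[i:]
--
-- def _count_fit(rest, n, sep, total):
--     k = 0
--     for p in rest:
--         total += len(sep) + len(p)
--         if total > n:
--             break
--         k += 1
--     return k
-- ===== Notes on version B (the rewrite author's own statement) =====
-- stated objective: alternative
-- what changed: B splits once and counts how many fields fit by pure length arithmetic (dropping the leading empty fields that A's truthiness test absorbs without separators), then emits the answer with a single final join, instead of A's repeated candidate-string concatenation and re-measurement.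
import Mathlib
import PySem

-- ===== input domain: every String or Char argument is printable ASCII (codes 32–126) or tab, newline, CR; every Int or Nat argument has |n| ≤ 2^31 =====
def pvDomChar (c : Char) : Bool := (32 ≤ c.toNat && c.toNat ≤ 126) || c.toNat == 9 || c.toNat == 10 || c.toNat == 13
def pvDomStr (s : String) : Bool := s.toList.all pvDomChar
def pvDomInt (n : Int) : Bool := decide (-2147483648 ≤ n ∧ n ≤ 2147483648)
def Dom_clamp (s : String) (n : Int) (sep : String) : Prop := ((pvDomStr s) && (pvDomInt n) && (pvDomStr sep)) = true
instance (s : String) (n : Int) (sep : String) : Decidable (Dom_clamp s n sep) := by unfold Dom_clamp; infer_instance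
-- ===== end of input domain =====

-- B splits once and counts fitting fields by length arithmetic with one final join,
-- instead of A's growing candidate string re-measured each step (objective: alternative).

-- ===== PORT A =====
-- the for-loop of A: state r, break on the first field that does not fit
def clampLoopA (n : Int) (sep : String) : List String → String → String
  | [], r => r
  | p :: rest, r =>
    let c := if r = "" then p else r ++ sep ++ p
    if PySem.Str.len c ≤ n then clampLoopA n sep rest c else r

def clamp (s : String) (n : Int) (sep : String) : String :=
  if PySem.Str.len s ≤ n then s
  else
    match PySem.Str.split? s sep with
    | none => ""          -- Python raises ValueError here (sep = ""); excluded by Pre_clamp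
    | some parts => clampLoopA n sep parts ""

-- ===== PORT B =====
-- port of _drop_leading_empty
def dropLeadingEmpty : List String → List String
  | [] => []
  | p :: rest => if p = "" then dropLeadingEmpty rest else p :: rest

-- port of _count_fit
def countFit (n : Int) (sep : String) : List String → Int → Nat
  | [], _ => 0
  | p :: rest, total =>
    let total' := total + PySem.Str.len sep + PySem.Str.len p
    if total' ≤ n then countFit n sep rest total' + 1 else 0

def clamp_alt (s : String) (n : Int) (sep : String) : String :=
  if PySem.Str.len s ≤ n then s
  else
    match PySem.Str.split? s sep with
    | none => ""          -- Python raises ValueError here (sep = ""); excluded by Pre_clamp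
    | some parts =>
      match dropLeadingEmpty parts with
      | [] => ""
      | p :: rest =>
        if n < PySem.Str.len p then ""
        else PySem.Str.join sep ((p :: rest).take (1 + countFit n sep rest (PySem.Str.len p)))

-- ===== PRECONDITION & SPEC =====
-- Pre_ excludes only sep = "" when a split is needed: there Python's str.split raises ValueError (in A and in B alike).
def Pre_clamp (s : String) (n : Int) (sep : String) : Prop := PySem.Str.len s ≤ n ∨ sep ≠ ""
instance (s : String) (n : Int) (sep : String) : Decidable (Pre_clamp s n sep) := by unfold Pre_clamp; infer_instance

def pvWitness_clamp : String × Int × String := ("ab cd ef", 5, " ")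

def Spec_clamp (s : String) (n : Int) (sep : String) (out : String) : Prop := out = clamp_alt s n sep
instance (s : String) (n : Int) (sep : String) (out : String) : Decidable (Spec_clamp s n sep out) := by unfold Spec_clamp; infer_instance

-- ===== CLAIM (what is proved, stated in full; the proofs are below) =====
def Claim_equal_clamp : Prop := ∀ (s : String) (n : Int) (sep : String), Dom_clamp s n sep → Pre_clamp s n sep → Spec_clamp s n sep (clamp s n sep)

-- ===== LEMMAS AND PROOFS =====

theorem str_len_nonneg (s : String) : 0 ≤ PySem.Str.len s := by
  simp [PySem.Str.len_eq]

theorem str_len_pos_of_ne (s : String) (h : s ≠ "") : 1 ≤ PySem.Str.len s := by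
  rw [PySem.Str.len_eq]
  have : s.toList ≠ [] := by simpa [String.toList_eq_nil_iff] using h
  have := List.length_pos_iff.mpr this
  omega

theorem str_ne_empty_of_len_pos (s : String) (h : 1 ≤ PySem.Str.len s) : s ≠ "" := by
  intro he; subst he; simp [PySem.Str.len_eq] at h

-- if n < 0 nothing ever fits starting from the empty accumulator
theorem clampLoopA_neg (n : Int) (sep : String) (parts : List String) (hn : n < 0) :
    clampLoopA n sep parts "" = "" := by
  cases parts with
  | nil => rfl
  | cons p rest =>
    have h0 := str_len_nonneg p
    simp only [clampLoopA, reduceIte]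
    rw [if_neg (by omega)]

-- A's loop from the empty accumulator first absorbs the leading empty fields (no separator is added)
theorem clampLoopA_drop (n : Int) (sep : String) (hn : 0 ≤ n) (parts : List String) :
    clampLoopA n sep parts "" =
      match dropLeadingEmpty parts with
      | [] => ""
      | p :: rest => if PySem.Str.len p ≤ n then clampLoopA n sep rest p else "" := by
  induction parts with
  | nil => rfl
  | cons p rest ih =>
    by_cases hp : p = ""
    · subst hp
      simp only [clampLoopA, dropLeadingEmpty, reduceIte]
      rw [if_pos (show PySem.Str.len "" ≤ n by simp [PySem.Str.len_eq]; omega)]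
      exact ih
    · simp only [clampLoopA, dropLeadingEmpty, reduceIte, if_neg hp]

-- joining after gluing one more field onto the accumulator = joining with the field as its own element
theorem join_glue (sep r p : String) (l : List String) :
    PySem.Str.join sep ((r ++ sep ++ p) :: l) = PySem.Str.join sep (r :: p :: l) := by
  apply String.toList_inj.mp
  cases l with
  | nil =>
    simp [PySem.Str.toList_join, PySem.Chars.join_singleton, PySem.Chars.join_cons_cons]
  | cons q l' =>
    simp [PySem.Str.toList_join, PySem.Chars.join_cons_cons, List.append_assoc]

theorem join_single (sep r : String) : PySem.Str.join sep [r] = r := by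
  apply String.toList_inj.mp
  simp [PySem.Str.toList_join, PySem.Chars.join_singleton]

-- the head of dropLeadingEmpty's result is never ""
theorem dropLeadingEmpty_head_ne : ∀ (parts : List String) (p : String) (rest : List String),
    dropLeadingEmpty parts = p :: rest → p ≠ "" := by
  intro parts
  induction parts with
  | nil => intro p rest h; simp [dropLeadingEmpty] at h
  | cons q qs ihq =>
    intro p rest h
    by_cases hq : q = ""
    · subst hq
      simp only [dropLeadingEmpty, reduceIte] at h
      exact ihq p rest h
    · simp only [dropLeadingEmpty, if_neg hq] at h
      cases h
      exact hq

-- the main loop invariant: from a nonempty accumulator, A's loop returns the join of the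
-- fields B's counter accepts
theorem clampLoopA_main (n : Int) (sep : String) (rest : List String) :
    ∀ r : String, r ≠ "" →
      clampLoopA n sep rest r =
        PySem.Str.join sep (r :: rest.take (countFit n sep rest (PySem.Str.len r))) := by
  induction rest with
  | nil => intro r _; simp [clampLoopA, countFit, join_single]
  | cons p rest' ih =>
    intro r hr
    have hc : PySem.Str.len (r ++ sep ++ p) = PySem.Str.len r + PySem.Str.len sep + PySem.Str.len p := by
      simp only [PySem.Str.len_append]
    simp only [clampLoopA, countFit, if_neg hr]
    by_cases hfit : PySem.Str.len r + PySem.Str.len sep + PySem.Str.len p ≤ n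
    · rw [if_pos (by omega), if_pos hfit]
      have hrp : (r ++ sep ++ p) ≠ "" := by
        apply str_ne_empty_of_len_pos
        have := str_len_pos_of_ne r hr
        have := str_len_nonneg sep
        have := str_len_nonneg p
        omega
      rw [ih _ hrp, hc, List.take_succ_cons, join_glue]
    · rw [if_neg (by omega), if_neg hfit]
      simp [join_single]

-- ===== VERDICT (by name: the statement is the Claim_ definition above) =====
theorem clamp_spec : Claim_equal_clamp := by
  intro s n sep _ hpre
  unfold Spec_clamp clamp clamp_alt
  by_cases hle : PySem.Str.len s ≤ n
  · rw [if_pos hle, if_pos hle]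
  · rw [if_neg hle, if_neg hle]
    have hsep : sep ≠ "" := by
      rcases hpre with h | h
      · exact absurd h hle
      · exact h
    have hsome : (PySem.Str.split? s sep).isSome := by
      simp [PySem.Str.split?, PySem.Chars.split?]
      intro hh
      exact hsep (by simpa [String.toList_eq_nil_iff] using hh)
    obtain ⟨parts, hparts⟩ := Option.isSome_iff_exists.mp hsome
    rw [hparts]
    dsimp only
    by_cases hn : 0 ≤ n
    · rw [clampLoopA_drop n sep hn parts]
      cases hdrop : dropLeadingEmpty parts with
      | nil => rfl
      | cons p rest =>
        have hp : p ≠ "" := dropLeadingEmpty_head_ne parts p rest hdrop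
        by_cases hpn : PySem.Str.len p ≤ n
        · simp only [if_pos hpn, if_neg (by omega : ¬ n < PySem.Str.len p)]
          rw [clampLoopA_main n sep rest p hp, Nat.add_comm, List.take_succ_cons]
        · simp only [if_neg hpn, if_pos (by omega : n < PySem.Str.len p)]
    · rw [clampLoopA_neg n sep parts (by omega)]
      cases hdrop : dropLeadingEmpty parts with
      | nil => rfl
      | cons p rest =>
        dsimp only
        rw [if_pos]
        have := str_len_nonneg p
        omega
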